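-- pv_equiv track=rewrite | github.com/SinqaX/Segundo_Semestre_U | taller1sem2.py | contar_primos_en_matrices
-- ===== SOURCE A (Python) =====
-- def primo(numero):
--     if numero < 2:
--         return False
--     for i in range(2, numero):
--         if numero % i == 0:
--             return False
--     return True
--
-- def contar_primos_en_matrices(matriz_1, matriz_2):
--     diccionario = {}
--
--     for fila in matriz_1:
--         for numero in fila:
--             if primo(numero):
--                 if numero in diccionario:
--                     diccionario[numero] += 1
--                 else:
--                     diccionario[numero] = 1
--
--     for fila in matriz_2:
--         for numero in fila:
--             if primo(numero):
--                 if numero in diccionario: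
--                     diccionario[numero] += 1
--                 else:
--                     diccionario[numero] = 1
--
--     return diccionario
-- ===== SOURCE B (Python) =====
-- def es_primo(n):
--     if n < 2:
--         return False
--     if n < 4:
--         return True
--     if n % 2 == 0:
--         return False
--     i = 3
--     while i * i <= n:
--         if n % i == 0:
--             return False
--         i += 2
--     return True
--
-- def contar_primos_en_matrices(matriz_1, matriz_2):
--     primos = [n for fila in (matriz_1 + matriz_2) for n in fila if es_primo(n)]
--     cuenta = {}
--     for n in primos:
--         cuenta[n] = cuenta.get(n, 0) + 1
--     return cuenta
-- ===== Notes on version B (the rewrite author's own statement) =====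
-- stated objective: faster
-- what changed: Primality is decided by odd trial division up to sqrt(n) instead of testing every i in range(2,n), and the counting is one pass over a single flattened prime list with dict.get instead of two copies of a nested membership-test loop.
import Mathlib
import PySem

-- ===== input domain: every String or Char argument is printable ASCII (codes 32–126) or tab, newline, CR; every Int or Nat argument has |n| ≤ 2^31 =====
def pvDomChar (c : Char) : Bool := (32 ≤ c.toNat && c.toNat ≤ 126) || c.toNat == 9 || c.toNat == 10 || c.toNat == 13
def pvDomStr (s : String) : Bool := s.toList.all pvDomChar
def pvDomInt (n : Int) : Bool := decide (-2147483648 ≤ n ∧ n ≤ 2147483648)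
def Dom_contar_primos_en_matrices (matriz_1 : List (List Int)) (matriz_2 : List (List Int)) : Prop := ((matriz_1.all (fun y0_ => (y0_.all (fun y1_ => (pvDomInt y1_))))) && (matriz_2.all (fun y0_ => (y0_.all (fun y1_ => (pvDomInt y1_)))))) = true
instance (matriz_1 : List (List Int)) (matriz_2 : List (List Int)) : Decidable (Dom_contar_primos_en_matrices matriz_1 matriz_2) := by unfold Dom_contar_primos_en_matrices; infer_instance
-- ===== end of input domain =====

-- B replaces A's full trial division range(2,n) by odd trial division up to √n and
-- the two nested counting loops by one pass over a single flattened list of primes (objective: faster).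

-- ===== PORT A =====
-- primo's 'for i in range(2, numero)' with its early 'return False';
-- the Nat argument is only a totality guard (fuel numero.toNat suffices)
def primoLoop (numero : Int) : Nat → Int → Bool
  | 0, _ => true
  | fuel + 1, i =>
    if i < numero then
      if PySem.Int.mod numero i == 0 then false
      else primoLoop numero fuel (i + 1)
    else true

def primo (numero : Int) : Bool :=
  if numero < 2 then false
  else primoLoop numero numero.toNat 2

def contar_primos_en_matrices (matriz_1 : List (List Int)) (matriz_2 : List (List Int)) : List (Int × Int) :=
  let d0 : PySem.Dict Int Int := PySem.Dict.empty
  let d1 := matriz_1.foldl (fun d fila =>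
    fila.foldl (fun d numero =>
      if primo numero then
        if d.contains numero then d.modify numero 0 (· + 1)
        else d.insert numero 1
      else d) d) d0
  let d2 := matriz_2.foldl (fun d fila =>
    fila.foldl (fun d numero =>
      if primo numero then
        if d.contains numero then d.modify numero 0 (· + 1)
        else d.insert numero 1
      else d) d) d1
  d2.items

-- ===== PORT B =====
-- the 'while i*i <= n' loop of es_primo; the Nat argument is only a totality guard
-- (fuel n.toNat suffices: i grows by 2 each pass while i*i ≤ n)
def esPrimoLoop (n : Int) : Nat → Int → Bool
  | 0, _ => true
  | fuel + 1, i =>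
    if i * i ≤ n then
      if PySem.Int.mod n i == 0 then false
      else esPrimoLoop n fuel (i + 2)
    else true

def es_primo (n : Int) : Bool :=
  if n < 2 then false
  else if n < 4 then true
  else if PySem.Int.mod n 2 == 0 then false
  else esPrimoLoop n n.toNat 3

def contar_primos_en_matrices_alt (matriz_1 : List (List Int)) (matriz_2 : List (List Int)) : List (Int × Int) :=
  let primos := ((matriz_1 ++ matriz_2).flatMap (fun fila => fila)).filter es_primo
  let cuenta := primos.foldl (fun d n => d.insert n (d.getD n 0 + 1)) (PySem.Dict.empty : PySem.Dict Int Int)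
  cuenta.items

-- ===== PRECONDITION & SPEC =====
def Spec_contar_primos_en_matrices (matriz_1 : List (List Int)) (matriz_2 : List (List Int)) (out : List (Int × Int)) : Prop := out = contar_primos_en_matrices_alt matriz_1 matriz_2
instance (matriz_1 : List (List Int)) (matriz_2 : List (List Int)) (out : List (Int × Int)) : Decidable (Spec_contar_primos_en_matrices matriz_1 matriz_2 out) := by unfold Spec_contar_primos_en_matrices; infer_instance

-- ===== CLAIM (what is proved, stated in full; the proofs are below) =====
def Claim_equal_contar_primos_en_matrices : Prop := ∀ (matriz_1 : List (List Int)) (matriz_2 : List (List Int)), Dom_contar_primos_en_matrices matriz_1 matriz_2 → Spec_contar_primos_en_matrices matriz_1 matriz_2 (contar_primos_en_matrices matriz_1 matriz_2)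

-- ===== LEMMAS AND PROOFS =====

-- the for loop says: no divisor j with i ≤ j < numero
theorem primoLoop_iff (numero : Int) : ∀ (fuel : Nat) (i : Int), 2 ≤ i → (numero - i).toNat ≤ fuel →
    (primoLoop numero fuel i = true ↔ ∀ j : Int, i ≤ j → j < numero → ¬ j ∣ numero) := by
  intro fuel
  induction fuel with
  | zero =>
    intro i hi hfuel
    simp only [primoLoop, true_iff]
    intro j hij hlt
    omega
  | succ fuel ih =>
    intro i hi hfuel
    simp only [primoLoop]
    by_cases hlt : i < numero
    · rw [if_pos hlt]
      by_cases hdvd : (PySem.Int.mod numero i == 0) = true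
      · rw [if_pos hdvd]
        simp only [Bool.false_eq_true, false_iff]
        intro hall
        exact hall i le_rfl hlt ((PySem.Int.mod_eq_zero_iff_dvd numero i).mp (by simpa using hdvd))
      · rw [if_neg hdvd]
        rw [ih (i + 1) (by omega) (by omega)]
        constructor
        · intro hall j hij hjlt
          rcases eq_or_lt_of_le hij with rfl | h
          · intro hd
            exact hdvd (by simp [(PySem.Int.mod_eq_zero_iff_dvd numero i).mpr hd])
          · exact hall j (by omega) hjlt
        · intro hall j hij hjlt
          exact hall j (by omega) hjlt
    · rw [if_neg hlt]
      simp only [true_iff]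
      intro j hij hjlt
      omega

-- A's primality test says: n ≥ 2 and no divisor in [2, n)
theorem primo_iff (n : Int) :
    primo n = true ↔ 2 ≤ n ∧ ∀ i : Int, 2 ≤ i → i < n → ¬ i ∣ n := by
  unfold primo
  split
  · simp; omega
  · rename_i h
    rw [primoLoop_iff n n.toNat 2 le_rfl (by omega)]
    constructor
    · intro hall
      exact ⟨by omega, hall⟩
    · rintro ⟨-, hall⟩
      exact hall

-- the while loop says: no divisor j ≡ i (mod 2), i ≤ j, j² ≤ n
theorem esPrimoLoop_iff (n : Int) : ∀ (fuel : Nat) (i : Int), 3 ≤ i → (n + 2 - i).toNat ≤ fuel →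
    (esPrimoLoop n fuel i = true ↔ ∀ j : Int, i ≤ j → 2 ∣ (j - i) → j * j ≤ n → ¬ j ∣ n) := by
  intro fuel
  induction fuel with
  | zero =>
    intro i hi hfuel
    simp only [esPrimoLoop, true_iff]
    intro j hij hpar hsq
    have h1 : i * i ≤ j * j := mul_le_mul hij hij (by omega) (by omega)
    have h2 : i ≤ i * i := le_mul_of_one_le_left (by omega) (by omega)
    omega
  | succ fuel ih =>
    intro i hi hfuel
    simp only [esPrimoLoop]
    by_cases hle : i * i ≤ n
    · rw [if_pos hle]
      have hin : i ≤ n := by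
        have : i ≤ i * i := le_mul_of_one_le_left (by omega) (by omega)
        omega
      by_cases hdvd : (PySem.Int.mod n i == 0) = true
      · rw [if_pos hdvd]
        simp only [Bool.false_eq_true, false_iff]
        intro hall
        exact hall i le_rfl (by simp) hle ((PySem.Int.mod_eq_zero_iff_dvd n i).mp (by simpa using hdvd))
      · rw [if_neg hdvd]
        rw [ih (i + 2) (by omega) (by omega)]
        constructor
        · intro hall j hij hpar hsq
          rcases eq_or_lt_of_le hij with rfl | hlt
          · intro h
            exact hdvd (by simp [(PySem.Int.mod_eq_zero_iff_dvd n i).mpr h])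
          · exact hall j (by omega) (by omega) hsq
        · intro hall j hij hpar hsq
          exact hall j (by omega) (by omega) hsq
    · rw [if_neg hle]
      simp only [true_iff]
      intro j hij hpar hsq
      have : i * i ≤ j * j := mul_le_mul hij hij (by omega) (by omega)
      omega

-- B's primality test agrees with A's
theorem primo_eq_es_primo (n : Int) : primo n = es_primo n := by
  rw [Bool.eq_iff_iff, primo_iff]
  unfold es_primo
  split_ifs with h2 h4 heven
  · simp only [iff_false]
    intro h; omega
  · simp only [iff_true]
    refine ⟨by omega, fun i hi hlt hdvd => ?_⟩
    interval_cases n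
    all_goals interval_cases i <;> omega
  · simp only [iff_false]
    have heven' : (2:Int) ∣ n := (PySem.Int.mod_eq_zero_iff_dvd n 2).mp (by simpa using heven)
    rintro ⟨-, hnd⟩
    exact hnd 2 le_rfl (by omega) heven'
  · have hodd : ¬ (2:Int) ∣ n := fun h =>
      heven (by simpa using (PySem.Int.mod_eq_zero_iff_dvd n 2).mpr h)
    rw [esPrimoLoop_iff n n.toNat 3 le_rfl (by omega)]
    constructor
    · rintro ⟨-, hnd⟩ j hj3 hpar hsq hdvd
      have hjn : j < n := by nlinarith
      exact hnd j (by omega) hjn hdvd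
    · intro hloop
      refine ⟨by omega, fun i hi hlt hdvd => ?_⟩
      set m : Nat := n.toNat with hm'
      have hnm : (m : Int) = n := Int.toNat_of_nonneg (by omega)
      have hnp : ¬ Nat.Prime m := by
        intro hp
        refine (Nat.prime_def_lt'.mp hp).2 i.toNat (by omega) (by omega) ?_
        have : (i.toNat : Int) ∣ (m : Int) := by
          rw [hnm, Int.toNat_of_nonneg (by omega : (0:Int) ≤ i)]
          exact hdvd
        exact_mod_cast this
      have hpm := Nat.minFac_prime (show m ≠ 1 by omega)
      have hdm := Nat.minFac_dvd m
      have hsq : m.minFac ^ 2 ≤ m := Nat.minFac_sq_le_self (by omega) hnp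
      have hp2 : m.minFac ≠ 2 := by
        intro h
        apply hodd
        rw [← hnm]
        exact_mod_cast (h ▸ hdm)
      have hp3 : 3 ≤ m.minFac := by
        have := hpm.two_le
        omega
      refine hloop (m.minFac : Int) (by exact_mod_cast hp3) ?_ ?_ ?_
      · -- 2 ∣ minFac - 3 : minFac is odd
        have hoddp : ¬ 2 ∣ m.minFac := fun h =>
          hp2 ((Nat.prime_dvd_prime_iff_eq Nat.prime_two hpm).mp h).symm
        omega
      · have h1 : m.minFac * m.minFac ≤ m := by nlinarith
        have : (m.minFac : Int) * m.minFac ≤ (m : Int) := by exact_mod_cast h1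
        omega
      · rw [← hnm]
        exact_mod_cast hdm

-- the per-element dict updates coincide
theorem step_eq :
    (fun (d : PySem.Dict Int Int) numero =>
      if primo numero then
        if d.contains numero then d.modify numero 0 (· + 1)
        else d.insert numero 1
      else d)
    = (fun (d : PySem.Dict Int Int) n => if es_primo n then d.insert n (d.getD n 0 + 1) else d) := by
  funext d n
  rw [← primo_eq_es_primo]
  by_cases hp : primo n
  · simp only [hp, if_true]
    by_cases hc : d.contains n
    · simp [hc, PySem.Dict.modify]
    · simp [hc, PySem.Dict.getD_of_not_contains d 0 (by simpa using hc)]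
  · simp [hp]

-- ===== VERDICT (by name: the statement is the Claim_ definition above) =====
theorem contar_primos_en_matrices_spec : Claim_equal_contar_primos_en_matrices := by
  intro m1 m2 _
  unfold Spec_contar_primos_en_matrices contar_primos_en_matrices contar_primos_en_matrices_alt
  simp only [List.foldl_filter, List.foldl_flatMap, List.foldl_append, step_eq]
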